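-- pv_equiv track=rewrite | github.com/LeoZedek/adventofcode | 2023/J14/solution1.py | tilted
-- ===== SOURCE A (Python) =====
-- def tilted(line):
--
-- 	free_space_index = 0
--
-- 	index_rocks = []
--
-- 	for i in range(len(line)):
--
-- 		char = line[i]
--
-- 		if char == "#":
-- 			free_space_index = i + 1
--
-- 		elif char == "O":
-- 			index_rocks.append(free_space_index)
-- 			free_space_index += 1
--
-- 	result = []
--
-- 	for i in range(len(line)):
--
-- 		char = line[i]
--
-- 		if char == "#":
-- 			result.append("#")
-- 		elif i in index_rocks:
-- 			result.append("O")
-- 		else: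
-- 			result.append(".")
--
-- 	return "".join(result)
-- ===== SOURCE B (Python) =====
-- def tilted(line):
-- 	out = []
-- 	rocks = 0
-- 	seg_len = 0
-- 	for char in line:
-- 		if char == "#":
-- 			out.append("O" * rocks + "." * (seg_len - rocks) + "#")
-- 			rocks = 0
-- 			seg_len = 0
-- 		else:
-- 			if char == "O":
-- 				rocks += 1
-- 			seg_len += 1
-- 	out.append("O" * rocks + "." * (seg_len - rocks))
-- 	return "".join(out)
-- ===== Notes on version B (the rewrite author's own statement) =====
-- stated objective: faster
-- what changed: Single forward pass that flushes each '#'-delimited segment as 'O'*rocks + '.'*(len-rocks), replacing A's two passes and its O(n) membership test 'i in index_rocks' inside the second loop.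
import Mathlib
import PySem

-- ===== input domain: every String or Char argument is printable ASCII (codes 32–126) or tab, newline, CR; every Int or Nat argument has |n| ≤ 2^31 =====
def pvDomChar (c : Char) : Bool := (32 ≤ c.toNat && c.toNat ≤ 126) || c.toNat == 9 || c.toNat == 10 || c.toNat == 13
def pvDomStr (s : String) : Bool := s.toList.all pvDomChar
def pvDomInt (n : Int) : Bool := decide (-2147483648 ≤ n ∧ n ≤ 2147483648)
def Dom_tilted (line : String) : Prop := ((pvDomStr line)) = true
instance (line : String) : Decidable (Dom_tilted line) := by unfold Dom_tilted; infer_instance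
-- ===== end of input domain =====

-- B replaces A's two passes (with a linear membership scan inside the second) by one
-- pass that flushes each '#'-delimited segment as rocks-then-dots; same return value.

-- ===== PORT A =====

-- helper: index/value pairs, as Python's `for i in range(len(line)): char = line[i]`
def pvEnumFrom {α : Type} : Nat → List α → List (Nat × α)
  | _, [] => []
  | i, a :: as => (i, a) :: pvEnumFrom (i + 1) as

-- first loop's body: state = (free_space_index, index_rocks)
def tiltedFirst (st : Nat × List Nat) (ic : Nat × Char) : Nat × List Nat :=
  if ic.2 = '#' then (ic.1 + 1, st.2)
  else if ic.2 = 'O' then (st.1 + 1, st.2 ++ [st.1])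
  else st

def tilted (line : String) : String :=
  let cs := line.toList
  let index_rocks := ((pvEnumFrom 0 cs).foldl tiltedFirst (0, [])).2
  let result := (pvEnumFrom 0 cs).foldl (fun acc ic =>
    if ic.2 = '#' then acc ++ ['#']
    else if ic.1 ∈ index_rocks then acc ++ ['O']
    else acc ++ ['.']) []
  String.mk result

-- ===== PORT B =====

-- loop body of Source B: state = (out, rocks, seg_len)
def tiltedStep (st : List Char × Nat × Nat) (c : Char) : List Char × Nat × Nat :=
  if c = '#' then
    (st.1 ++ List.replicate st.2.1 'O' ++ List.replicate (st.2.2 - st.2.1) '.' ++ ['#'], 0, 0)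
  else if c = 'O' then (st.1, st.2.1 + 1, st.2.2 + 1)
  else (st.1, st.2.1, st.2.2 + 1)

def tilted_alt (line : String) : String :=
  let st := line.toList.foldl tiltedStep ([], 0, 0)
  String.mk (st.1 ++ List.replicate st.2.1 'O' ++ List.replicate (st.2.2 - st.2.1) '.')

-- ===== PRECONDITION & SPEC =====
def Spec_tilted (line : String) (out : String) : Prop := out = tilted_alt line
instance (line : String) (out : String) : Decidable (Spec_tilted line out) := by unfold Spec_tilted; infer_instance

-- ===== CLAIM (what is proved, stated in full; the proofs are below) =====
def Claim_equal_tilted : Prop := ∀ (line : String), Dom_tilted line → Spec_tilted line (tilted line)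

-- ===== LEMMAS AND PROOFS =====

-- character emitted by A's second loop at an index/char pair, given index_rocks R
def outF (R : List Nat) (ic : Nat × Char) : Char :=
  if ic.2 = '#' then '#' else if ic.1 ∈ R then 'O' else '.'

-- common recursive specification: roll each '#'-free segment, recurse past the '#'
def roll (l : List Char) : List Char :=
  let seg := l.takeWhile (fun c => !(c == '#'))
  let rest := l.dropWhile (fun c => !(c == '#'))
  let k := seg.countP (fun c => c == 'O')
  if hr : rest = [] then
    List.replicate k 'O' ++ List.replicate (seg.length - k) '.'
  else
    List.replicate k 'O' ++ List.replicate (seg.length - k) '.' ++ '#' :: roll rest.tail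
termination_by l.length
decreasing_by
  have h1 : (l.dropWhile (fun c => !(c == '#'))).length ≤ l.length :=
    List.length_dropWhile_le _ l
  cases hd : l.dropWhile (fun c => !(c == '#')) with
  | nil => exact absurd hd hr
  | cons c t => rw [hd] at h1; simp at h1 ⊢; omega

-- list-level forms of the two ports
def tiltedL (l : List Char) : List Char :=
  (pvEnumFrom 0 l).map (outF ((pvEnumFrom 0 l).foldl tiltedFirst (0, [])).2)

def tiltedAltL (l : List Char) : List Char :=
  let st := l.foldl tiltedStep ([], 0, 0)
  st.1 ++ List.replicate st.2.1 'O' ++ List.replicate (st.2.2 - st.2.1) '.'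

theorem tiltedFirst_eq_hash (st : Nat × List Nat) (ic : Nat × Char) (h : ic.2 = '#') :
    tiltedFirst st ic = (ic.1 + 1, st.2) := by simp [tiltedFirst, h]

theorem tiltedFirst_eq_O (st : Nat × List Nat) (ic : Nat × Char) (h : ic.2 = 'O') :
    tiltedFirst st ic = (st.1 + 1, st.2 ++ [st.1]) := by simp [tiltedFirst, h]

theorem tiltedFirst_eq_skip (st : Nat × List Nat) (ic : Nat × Char)
    (h1 : ¬ ic.2 = '#') (h2 : ¬ ic.2 = 'O') : tiltedFirst st ic = st := by
  simp [tiltedFirst, h1, h2]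

theorem enumFrom_append {α : Type} (xs ys : List α) : ∀ b,
    pvEnumFrom b (xs ++ ys) = pvEnumFrom b xs ++ pvEnumFrom (b + xs.length) ys := by
  induction xs with
  | nil => intro b; simp [pvEnumFrom]
  | cons x xs ih =>
      intro b
      simp only [List.cons_append, pvEnumFrom, ih (b + 1), List.length_cons]
      have h : b + 1 + xs.length = b + (xs.length + 1) := by omega
      rw [h]

theorem mem_enumFrom {α : Type} (l : List α) : ∀ b p, p ∈ pvEnumFrom b l →
    (b ≤ p.1 ∧ p.1 < b + l.length ∧ p.2 ∈ l) := by
  induction l with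
  | nil => intro b p h; simp [pvEnumFrom] at h
  | cons x xs ih =>
      intro b p h
      simp only [pvEnumFrom, List.mem_cons] at h
      rcases h with h | h
      · subst h
        exact ⟨le_refl _, by simp only [List.length_cons]; omega, by simp⟩
      · obtain ⟨h1, h2, h3⟩ := ih (b + 1) p h
        exact ⟨by omega, by simp only [List.length_cons]; omega, by simp [h3]⟩

theorem enumFrom_shift {α : Type} (l : List α) : ∀ b d,
    pvEnumFrom (b + d) l = (pvEnumFrom b l).map (fun ic => (ic.1 + d, ic.2)) := by
  induction l with
  | nil => intro b d; simp [pvEnumFrom]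
  | cons x xs ih =>
      intro b d
      simp only [pvEnumFrom, List.map_cons]
      have h : b + d + 1 = (b + 1) + d := by omega
      rw [h, ih (b + 1) d]

-- A's first loop over a '#'-free segment: rocks land at free, free+1, …
theorem fa_nohash (seg : List Char) : ∀ (f b : Nat) (r : List Nat),
    (∀ c ∈ seg, c ≠ '#') →
    (pvEnumFrom b seg).foldl tiltedFirst (f, r) =
      (f + seg.countP (fun c => c == 'O'),
       r ++ List.range' f (seg.countP (fun c => c == 'O'))) := by
  induction seg with
  | nil => intro f b r _; simp [pvEnumFrom]
  | cons c cs ih =>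
      intro f b r h
      have hc : c ≠ '#' := h c (by simp)
      have hcs : ∀ x ∈ cs, x ≠ '#' := fun x hx => h x (by simp [hx])
      by_cases hO : c = 'O'
      · rw [pvEnumFrom, List.foldl_cons, tiltedFirst_eq_O _ _ hO,
            ih (f + 1) (b + 1) (r ++ [f]) hcs]
        simp only [List.countP_cons, hO, Prod.mk.injEq]
        refine ⟨by simp; omega, ?_⟩
        simp only [show (('O' : Char) == 'O') = true from rfl, if_true]
        rw [List.range'_succ]
        simp
      · rw [pvEnumFrom, List.foldl_cons, tiltedFirst_eq_skip _ _ hc hO,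
            ih f (b + 1) r hcs]
        simp [List.countP_cons, hO]

-- the rocks accumulator is only appended to
theorem fa_acc (e : List (Nat × Char)) : ∀ (f : Nat) (r : List Nat),
    e.foldl tiltedFirst (f, r) =
      ((e.foldl tiltedFirst (f, [])).1, r ++ (e.foldl tiltedFirst (f, [])).2) := by
  induction e with
  | nil => intro f r; simp
  | cons ic e ih =>
      intro f r
      by_cases h1 : ic.2 = '#'
      · rw [List.foldl_cons, List.foldl_cons, tiltedFirst_eq_hash _ _ h1,
            tiltedFirst_eq_hash _ _ h1]
        exact ih _ r
      · by_cases h2 : ic.2 = 'O'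
        · rw [List.foldl_cons, List.foldl_cons, tiltedFirst_eq_O _ _ h2,
              tiltedFirst_eq_O _ _ h2]
          simp only [List.nil_append]
          rw [ih (f + 1) (r ++ [f]), ih (f + 1) [f]]
          simp
        · rw [List.foldl_cons, List.foldl_cons, tiltedFirst_eq_skip _ _ h1 h2,
              tiltedFirst_eq_skip _ _ h1 h2]
          exact ih f r

-- translating both index base and free pointer by d shifts all rocks by d
theorem fa_shift (l : List Char) : ∀ (f b d : Nat),
    (pvEnumFrom (b + d) l).foldl tiltedFirst (f + d, []) =
      (((pvEnumFrom b l).foldl tiltedFirst (f, [])).1 + d,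
       ((pvEnumFrom b l).foldl tiltedFirst (f, [])).2.map (· + d)) := by
  induction l with
  | nil => intro f b d; simp [pvEnumFrom]
  | cons c cs ih =>
      intro f b d
      have e1 : b + d + 1 = (b + 1) + d := by omega
      by_cases h1 : c = '#'
      · rw [pvEnumFrom, pvEnumFrom, List.foldl_cons, List.foldl_cons,
            tiltedFirst_eq_hash _ _ h1, tiltedFirst_eq_hash _ _ h1]
        simp only
        rw [e1, ih (b + 1) (b + 1) d]
      · by_cases h2 : c = 'O'
        · rw [pvEnumFrom, pvEnumFrom, List.foldl_cons, List.foldl_cons,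
              tiltedFirst_eq_O _ _ h2, tiltedFirst_eq_O _ _ h2]
          simp only [List.nil_append]
          have e2 : f + d + 1 = (f + 1) + d := by omega
          rw [e1, e2, fa_acc (pvEnumFrom ((b + 1) + d) cs) ((f + 1) + d) [f + d],
              ih (f + 1) (b + 1) d,
              fa_acc (pvEnumFrom (b + 1) cs) (f + 1) [f]]
          simp
        · rw [pvEnumFrom, pvEnumFrom, List.foldl_cons, List.foldl_cons,
              tiltedFirst_eq_skip _ _ h1 h2, tiltedFirst_eq_skip _ _ h1 h2]
          rw [e1, ih f (b + 1) d]

-- A's second loop is a map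
theorem secondPass_eq_map (R : List Nat) (e : List (Nat × Char)) : ∀ acc,
    e.foldl (fun acc ic =>
      if ic.2 = '#' then acc ++ ['#']
      else if ic.1 ∈ R then acc ++ ['O']
      else acc ++ ['.']) acc = acc ++ e.map (outF R) := by
  induction e with
  | nil => intro acc; simp
  | cons ic e ih =>
      intro acc
      simp only [List.foldl_cons, List.map_cons, outF]
      split_ifs with h1 h2 <;> rw [ih] <;> simp

-- B's out accumulator is only appended to
theorem fb_acc (l : List Char) : ∀ (out : List Char) (r s : Nat),
    l.foldl tiltedStep (out, r, s) =
      (out ++ (l.foldl tiltedStep ([], r, s)).1,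
       (l.foldl tiltedStep ([], r, s)).2) := by
  induction l with
  | nil => intro out r s; simp
  | cons c cs ih =>
      intro out r s
      simp only [List.foldl_cons, tiltedStep]
      split_ifs with h1 h2
      · simp only [List.nil_append]
        rw [ih (out ++ List.replicate r 'O' ++ List.replicate (s - r) '.' ++ ['#']) 0 0,
            ih (List.replicate r 'O' ++ List.replicate (s - r) '.' ++ ['#']) 0 0]
        simp
      · exact ih out (r + 1) (s + 1)
      · exact ih out r (s + 1)

-- B over a '#'-free segment just counts
theorem fb_nohash (l : List Char) : ∀ (out : List Char) (r s : Nat),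
    (∀ c ∈ l, c ≠ '#') →
    l.foldl tiltedStep (out, r, s) =
      (out, r + l.countP (fun c => c == 'O'), s + l.length) := by
  induction l with
  | nil => intro out r s _; simp
  | cons c cs ih =>
      intro out r s h
      have hc : c ≠ '#' := h c (by simp)
      have hcs : ∀ x ∈ cs, x ≠ '#' := fun x hx => h x (by simp [hx])
      simp only [List.foldl_cons, tiltedStep, if_neg hc, List.countP_cons, List.length_cons]
      by_cases hO : c = 'O'
      · rw [if_pos hO, ih out (r + 1) (s + 1) hcs]
        simp [hO]; omega
      · rw [if_neg hO, ih out r (s + 1) hcs]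
        simp [hO]; omega

-- A's second pass over a '#'-free segment with rocks = range k
theorem segOut (l : List Char) : ∀ (k : Nat),
    (∀ c ∈ l, c ≠ '#') → k ≤ l.length →
    (pvEnumFrom 0 l).map (outF (List.range k)) =
      List.replicate k 'O' ++ List.replicate (l.length - k) '.' := by
  induction l with
  | nil =>
      intro k _ hk
      have hk0 : k = 0 := by simp at hk; omega
      subst hk0
      simp [pvEnumFrom]
  | cons c cs ih =>
      intro k h hk
      have hc : c ≠ '#' := h c (by simp)
      have hcs : ∀ x ∈ cs, x ≠ '#' := fun x hx => h x (by simp [hx])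
      have hsh : pvEnumFrom 1 cs = (pvEnumFrom 0 cs).map (fun ic => (ic.1 + 1, ic.2)) :=
        enumFrom_shift cs 0 1
      cases k with
      | zero =>
          simp only [pvEnumFrom, List.map_cons, outF, if_neg hc, List.range_zero,
            List.not_mem_nil, if_false, hsh, List.map_map]
          have ih0 := ih 0 hcs (by omega)
          rw [List.range_zero] at ih0
          have heq : ((pvEnumFrom 0 cs).map ((outF ([] : List Nat)) ∘ (fun ic => (ic.1 + 1, ic.2)))) =
              (pvEnumFrom 0 cs).map (outF ([] : List Nat)) := by
            apply List.map_congr_left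
            intro ic _
            simp [outF, Function.comp]
          rw [heq, ih0]
          simp [List.replicate_succ]
      | succ k' =>
          have hk' : k' ≤ cs.length := by simp only [List.length_cons] at hk; omega
          simp only [pvEnumFrom, List.map_cons, outF]
          rw [if_neg hc, if_pos (by simp : (0 : Nat) ∈ List.range (k' + 1)), hsh, List.map_map]
          have heq : ((pvEnumFrom 0 cs).map ((outF (List.range (k' + 1))) ∘ (fun ic => (ic.1 + 1, ic.2)))) =
              (pvEnumFrom 0 cs).map (outF (List.range k')) := by
            apply List.map_congr_left
            intro ic _
            have h2 : (ic.1 + 1 < k' + 1) ↔ (ic.1 < k') := by omega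
            simp [Function.comp, outF, List.mem_range, h2]
          rw [heq, ih k' hcs hk']
          simp [List.replicate_succ, List.length_cons, Nat.succ_sub_succ]

-- head of a nonempty dropWhile fails the predicate
theorem dropWhile_head_hash (l : List Char) (c : Char) (t : List Char)
    (h : l.dropWhile (fun c => !(c == '#')) = c :: t) : c = '#' := by
  induction l with
  | nil => simp [List.dropWhile] at h
  | cons x xs ih =>
      by_cases hx : x = '#'
      · rw [List.dropWhile_cons_of_neg (by simp [hx])] at h
        cases h; exact hx
      · rw [List.dropWhile_cons_of_pos (by simp [hx])] at h
        exact ih h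

theorem takeWhile_nohash (l : List Char) :
    ∀ c ∈ l.takeWhile (fun c => !(c == '#')), c ≠ '#' := by
  intro c hc
  have := List.mem_takeWhile_imp hc
  simpa using this

-- main lemma for B: tiltedAltL = roll
theorem tiltedAltL_eq_roll : ∀ (n : Nat) (l : List Char), l.length ≤ n → tiltedAltL l = roll l := by
  intro n
  induction n with
  | zero =>
      intro l hl
      have h0 : l = [] := List.eq_nil_of_length_eq_zero (by omega)
      subst h0
      simp [tiltedAltL, roll]
  | succ n ih =>
      intro l hl
      have hsplit : l.takeWhile (fun c => !(c == '#')) ++ l.dropWhile (fun c => !(c == '#')) = l :=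
        List.takeWhile_append_dropWhile
      cases hd : l.dropWhile (fun c => !(c == '#')) with
      | nil =>
          have hl2 : l.takeWhile (fun c => !(c == '#')) = l := by
            conv_rhs => rw [← hsplit]
            rw [hd, List.append_nil]
          have hno : ∀ c ∈ l, c ≠ '#' := by
            intro c hc
            rw [← hl2] at hc
            exact takeWhile_nohash l c hc
          rw [roll]
          simp only [hd]
          rw [dif_pos trivial, hl2, tiltedAltL, fb_nohash l [] 0 0 hno]
          simp
      | cons c t =>
          have hc : c = '#' := dropWhile_head_hash l c t hd
          subst hc
          have hlEq : l = l.takeWhile (fun c => !(c == '#')) ++ '#' :: t := by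
            conv_lhs => rw [← hsplit]
            rw [hd]
          have hno : ∀ x ∈ l.takeWhile (fun c => !(c == '#')), x ≠ '#' := takeWhile_nohash l
          have hlen : t.length ≤ n := by
            have h2 := congrArg List.length hlEq
            simp only [List.length_append, List.length_cons] at h2
            omega
          rw [roll]
          simp only [hd]
          rw [dif_neg (by simp), tiltedAltL]
          conv_lhs => rw [hlEq]
          rw [List.foldl_append, fb_nohash _ [] 0 0 hno, List.foldl_cons]
          simp only [tiltedStep, Nat.zero_add]
          simp only [if_true]
          simp only [List.nil_append]
          rw [fb_acc t _ 0 0]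
          have ihB := ih t hlen
          rw [tiltedAltL] at ihB
          simp only [List.tail_cons, ← ihB]
          simp

-- main lemma for A: tiltedL = roll
theorem tiltedL_eq_roll : ∀ (n : Nat) (l : List Char), l.length ≤ n → tiltedL l = roll l := by
  intro n
  induction n with
  | zero =>
      intro l hl
      have h0 : l = [] := List.eq_nil_of_length_eq_zero (by omega)
      subst h0
      simp [tiltedL, roll, pvEnumFrom]
  | succ n ih =>
      intro l hl
      have hsplit : l.takeWhile (fun c => !(c == '#')) ++ l.dropWhile (fun c => !(c == '#')) = l :=
        List.takeWhile_append_dropWhile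
      cases hd : l.dropWhile (fun c => !(c == '#')) with
      | nil =>
          have hl2 : l.takeWhile (fun c => !(c == '#')) = l := by
            conv_rhs => rw [← hsplit]
            rw [hd, List.append_nil]
          have hno : ∀ c ∈ l, c ≠ '#' := by
            intro c hc
            rw [← hl2] at hc
            exact takeWhile_nohash l c hc
          rw [roll]
          simp only [hd]
          rw [dif_pos trivial, hl2, tiltedL, fa_nohash l 0 0 [] hno]
          simp only [List.nil_append, Nat.zero_add]
          rw [← List.range_eq_range',
              segOut l _ hno List.countP_le_length]
      | cons c t =>
          have hc : c = '#' := dropWhile_head_hash l c t hd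
          subst hc
          have hlEq : l = l.takeWhile (fun c => !(c == '#')) ++ '#' :: t := by
            conv_lhs => rw [← hsplit]
            rw [hd]
          have hno : ∀ x ∈ l.takeWhile (fun c => !(c == '#')), x ≠ '#' := takeWhile_nohash l
          have hlen : t.length ≤ n := by
            have h2 := congrArg List.length hlEq
            simp only [List.length_append, List.length_cons] at h2
            omega
          rw [roll]
          simp only [hd]
          rw [dif_neg (by simp)]
          simp only [List.tail_cons]
          -- abbreviations
          set seg := l.takeWhile (fun c => !(c == '#')) with hseg
          set k := seg.countP (fun c => c == 'O') with hk
          set m := seg.length with hm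
          set X := (pvEnumFrom 0 t).foldl tiltedFirst (0, []) with hX
          have hkm : k ≤ m := List.countP_le_length
          -- split of the enumeration
          have henum : pvEnumFrom 0 l = pvEnumFrom 0 seg ++ (m, '#') :: pvEnumFrom (m + 1) t := by
            conv_lhs => rw [hlEq]
            rw [enumFrom_append]
            simp [pvEnumFrom, hm]
          -- the rocks list of the whole line
          have hrocks : ((pvEnumFrom 0 l).foldl tiltedFirst (0, [])).2 =
              List.range' 0 k ++ X.2.map (· + (m + 1)) := by
            rw [henum, List.foldl_append, fa_nohash seg 0 0 [] hno]
            simp only [List.nil_append, Nat.zero_add, ← hk]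
            rw [List.foldl_cons, tiltedFirst_eq_hash _ _ rfl]
            simp only
            rw [fa_acc (pvEnumFrom (m + 1) t) (m + 1) (List.range' 0 k)]
            have hsh := fa_shift t 0 0 (m + 1)
            simp only [Nat.zero_add] at hsh
            rw [hsh]
          set R := List.range' 0 k ++ X.2.map (· + (m + 1)) with hR
          -- membership in R, below and above the '#'
          have memlow : ∀ j, j < m + 1 → ((j ∈ R) = (j ∈ List.range k)) := by
            intro j hj
            apply propext
            simp only [hR, List.mem_append, List.mem_map]
            constructor
            · rintro (h | ⟨x, hx, rfl⟩)
              · rw [List.range_eq_range']; exact h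
              · exact absurd hj (by omega)
            · intro h
              left
              rw [← List.range_eq_range']; exact h
          have memhigh : ∀ j, ((j + (m + 1) ∈ R) = (j ∈ X.2)) := by
            intro j
            apply propext
            simp only [hR, List.mem_append, List.mem_map, ← List.range_eq_range',
              List.mem_range]
            constructor
            · rintro (h | ⟨x, hx, hx2⟩)
              · exact absurd h (by omega)
              · have hxj : x = j := by omega
                rw [hxj] at hx; exact hx
            · intro h
              exact Or.inr ⟨j, h, rfl⟩
          -- second pass, in three parts
          rw [tiltedL, hrocks, henum, List.map_append, List.map_cons]
          have p2 : outF R (m, '#') = '#' := by simp [outF]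
          have p1 : (pvEnumFrom 0 seg).map (outF R) =
              List.replicate k 'O' ++ List.replicate (m - k) '.' := by
            have heq : (pvEnumFrom 0 seg).map (outF R) =
                (pvEnumFrom 0 seg).map (outF (List.range k)) := by
              apply List.map_congr_left
              intro ic hic
              obtain ⟨_, hlt, _⟩ := mem_enumFrom seg 0 ic hic
              simp only [outF, memlow ic.1 (by omega)]
            rw [heq, segOut seg k hno hkm]
          have p3 : (pvEnumFrom (m + 1) t).map (outF R) = roll t := by
            have ihA := ih t hlen
            rw [tiltedL, ← hX] at ihA
            have hsh := enumFrom_shift t 0 (m + 1)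
            simp only [Nat.zero_add] at hsh
            rw [hsh, List.map_map, ← ihA]
            apply List.map_congr_left
            intro ic _
            simp only [Function.comp, outF]
            by_cases hh : ic.2 = '#'
            · simp [hh]
            · simp only [if_neg hh, memhigh ic.1]
          rw [p1, p2, p3]
          try simp

theorem tilted_eq_tiltedL (line : String) : tilted line = String.mk (tiltedL line.toList) := by
  rw [tilted, tiltedL, secondPass_eq_map]
  simp

theorem tilted_alt_eq_tiltedAltL (line : String) :
    tilted_alt line = String.mk (tiltedAltL line.toList) := rfl

-- ===== VERDICT (by name: the statement is the Claim_ definition above) =====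
theorem tilted_spec : Claim_equal_tilted := by
  intro line _
  unfold Spec_tilted
  rw [tilted_eq_tiltedL, tilted_alt_eq_tiltedAltL,
      tiltedL_eq_roll line.toList.length line.toList (le_refl _),
      tiltedAltL_eq_roll line.toList.length line.toList (le_refl _)]
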